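-- pv_equiv track=rewrite | github.com/The-Folium/MAN_GA_Schedule | builder.py | _count_gaps
-- ===== SOURCE A (Python) =====
-- def _count_gaps(lst):
--     has_started = False
--     gap_count = 0
--     in_gap = False
--     last_idx = -1
--     for i in range(len(lst) - 1, -1, -1):
--         if lst[i] is not None:
--             last_idx = i
--             break
--
--     if last_idx == -1:
--         return 0
--     for i in range(last_idx + 1):
--         val = lst[i]
--         if val is not None:
--             has_started = True
--             if in_gap:
--                 gap_count += 1
--                 in_gap = False
--         else:
--             if has_started:
--                 in_gap = True
--     return gap_count
-- ===== SOURCE B (Python) =====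
-- def _count_gaps(lst):
--     idx = [i for i, v in enumerate(lst) if v is not None]
--     return sum(1 for a, b in zip(idx, idx[1:]) if b - a > 1)
-- ===== Notes on version B (the rewrite author's own statement) =====
-- stated objective: simpler
-- what changed: Replaced the reverse scan for the last non-None index plus a forward has_started/in_gap state machine by collecting the indices of non-None elements and counting adjacent index pairs whose difference exceeds 1.
import Mathlib
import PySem

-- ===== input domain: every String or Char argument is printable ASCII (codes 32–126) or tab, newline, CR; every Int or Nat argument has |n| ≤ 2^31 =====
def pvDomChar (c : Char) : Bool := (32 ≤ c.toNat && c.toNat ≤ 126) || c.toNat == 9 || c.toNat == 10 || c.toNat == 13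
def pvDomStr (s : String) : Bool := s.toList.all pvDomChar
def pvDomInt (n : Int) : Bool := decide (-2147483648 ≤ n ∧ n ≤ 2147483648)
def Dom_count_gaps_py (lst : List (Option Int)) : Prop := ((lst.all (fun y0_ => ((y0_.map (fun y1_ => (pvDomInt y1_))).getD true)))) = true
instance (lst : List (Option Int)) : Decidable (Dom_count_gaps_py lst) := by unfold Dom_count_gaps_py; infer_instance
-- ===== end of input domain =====

-- B replaces A's reverse scan + forward state machine by indices-of-non-None then a
-- pairwise adjacent-difference count (simpler decomposition, same O(n) cost).

-- ===== PORT A =====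
-- the first loop: scan range(len(lst)-1, -1, -1), break (return) at the first non-None
def pvFindLast (lst : List (Option Int)) : List Int → Int
  | [] => -1
  | i :: rest =>
    if PySem.List.pyGetD lst i none ≠ none then i else pvFindLast lst rest

-- one iteration of the second loop's body on the state (has_started, gap_count, in_gap)
def pvStepA (st : Bool × Int × Bool) (val : Option Int) : Bool × Int × Bool :=
  if val ≠ none then (true, (if st.2.2 then st.2.1 + 1 else st.2.1), false)
  else (st.1, st.2.1, if st.1 then true else st.2.2)

def count_gaps_py (lst : List (Option Int)) : Int :=
  let last_idx := pvFindLast lst (PySem.List.pyRange ((lst.length : Int) - 1) (-1) (-1))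
  if last_idx = -1 then 0
  else
    ((PySem.List.pyRange 0 (last_idx + 1) 1).foldl
      (fun st i => pvStepA st (PySem.List.pyGetD lst i none)) (false, 0, false)).2.1

-- ===== PORT B =====
def count_gaps_py_alt (lst : List (Option Int)) : Int :=
  let idx := ((PySem.List.enumerate lst 0).filter (fun p => p.2 ≠ none)).map (·.1)
  ((((idx.zip (PySem.List.slice idx (some 1) none)).filter
      (fun p => p.2 - p.1 > 1)).map (fun _ => (1 : Int)))).sum

-- ===== PRECONDITION & SPEC =====
def Spec_count_gaps_py (lst : List (Option Int)) (out : Int) : Prop := out = count_gaps_py_alt lst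
instance (lst : List (Option Int)) (out : Int) : Decidable (Spec_count_gaps_py lst out) := by unfold Spec_count_gaps_py; infer_instance

-- ===== CLAIM (what is proved, stated in full; the proofs are below) =====
def Claim_equal_count_gaps_py : Prop := ∀ (lst : List (Option Int)), Dom_count_gaps_py lst → Spec_count_gaps_py lst (count_gaps_py lst)

-- ===== LEMMAS AND PROOFS =====

-- the common reference: A's state machine as structural recursion on the list
def pvF : Bool → Bool → List (Option Int) → Int
  | _, _, [] => 0
  | _, ig, some _ :: t => (if ig then 1 else 0) + pvF true false t
  | hs, ig, none :: t => pvF hs (hs || ig) t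

-- the indices of non-None elements, starting at position k
def pvIdxs : Int → List (Option Int) → List Int
  | _, [] => []
  | k, some _ :: t => k :: pvIdxs (k + 1) t
  | k, none :: t => pvIdxs (k + 1) t

def pvPairGaps (l : List Int) : Int :=
  (((l.zip l.tail).filter (fun p => p.2 - p.1 > 1)).map (fun _ => (1 : Int))).sum

theorem fold_eq_F (lst : List (Option Int)) : ∀ (hs ig : Bool) (gc : Int),
    (lst.foldl pvStepA (hs, gc, ig)).2.1 = gc + pvF hs ig lst := by
  induction lst with
  | nil => intro hs ig gc; simp [pvF]
  | cons x t ih =>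
    intro hs ig gc
    cases x with
    | none => simp [pvStepA, pvF, ih]
    | some v =>
      simp only [List.foldl_cons, pvStepA, pvF]
      simp [ih]
      split <;> ring

theorem pairGaps_nil : pvPairGaps [] = 0 := by simp [pvPairGaps]

theorem pairGaps_single (a : Int) : pvPairGaps [a] = 0 := by simp [pvPairGaps]

theorem pairGaps_cons2 (a b : Int) (t : List Int) :
    pvPairGaps (a :: b :: t) = (if b - a > 1 then 1 else 0) + pvPairGaps (b :: t) := by
  simp only [pvPairGaps, List.tail_cons, List.zip_cons_cons, List.filter_cons]
  by_cases h : b - a > 1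
  · simp [h]
  · simp [h]

theorem L1 (t : List (Option Int)) : ∀ (k j : Int), j < k →
    pvPairGaps (j :: pvIdxs k t) = pvF true (decide (j + 1 < k)) t := by
  induction t with
  | nil => intro k j h; simp [pvIdxs, pvF, pairGaps_single]
  | cons x t ih =>
    intro k j h
    cases x with
    | some v =>
      rw [show pvIdxs k (some v :: t) = k :: pvIdxs (k + 1) t from rfl,
        pairGaps_cons2, ih (k + 1) k (by omega)]
      simp only [pvF]
      have : (decide (k + 1 < k + 1)) = false := by simp
      rw [this]
      by_cases hjk : j + 1 < k
      · simp [hjk]; omega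
      · simp [hjk]; omega
    | none =>
      rw [show pvIdxs k (none :: t) = pvIdxs (k + 1) t from rfl,
        ih (k + 1) j (by omega)]
      simp only [pvF, Bool.true_or]
      have : (decide (j + 1 < k + 1)) = true := by simp; omega
      rw [this]

theorem L0 (t : List (Option Int)) : ∀ (k : Int),
    pvPairGaps (pvIdxs k t) = pvF false false t := by
  induction t with
  | nil => intro k; simp [pvIdxs, pvF, pairGaps_nil]
  | cons x t ih =>
    intro k
    cases x with
    | some v =>
      rw [show pvIdxs k (some v :: t) = k :: pvIdxs (k + 1) t from rfl,
        L1 t (k + 1) k (by omega)]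
      simp [pvF]
    | none =>
      rw [show pvIdxs k (none :: t) = pvIdxs (k + 1) t from rfl, ih]
      simp [pvF]

theorem idx_eq_pvIdxs (lst : List (Option Int)) : ∀ (s : Int),
    ((PySem.List.enumerate lst s).filter (fun p => p.2 ≠ none)).map (·.1) = pvIdxs s lst := by
  induction lst with
  | nil => intro s; simp [PySem.List.enumerate_nil, pvIdxs]
  | cons x t ih =>
    intro s
    rw [PySem.List.enumerate_cons, List.filter_cons]
    cases x with
    | some v =>
      rw [if_pos (by simp), List.map_cons, ih]
      rfl
    | none =>
      rw [if_neg (by simp), ih]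
      rfl

theorem B_eq_F (lst : List (Option Int)) :
    count_gaps_py_alt lst = pvF false false lst := by
  rw [← L0 lst 0, ← idx_eq_pvIdxs lst 0]
  simp only [count_gaps_py_alt, pvPairGaps, PySem.List.slice_from_one]

theorem pvFindLast_congr (a b : List (Option Int)) : ∀ (r : List Int),
    (∀ i ∈ r, PySem.List.pyGetD a i none = PySem.List.pyGetD b i none) →
    pvFindLast a r = pvFindLast b r := by
  intro r
  induction r with
  | nil => intro _; rfl
  | cons i rest ih =>
    intro h
    simp only [pvFindLast, h i (List.mem_cons_self)]
    split
    · rfl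
    · exact ih (fun j hj => h j (List.mem_cons_of_mem _ hj))

theorem pvFindLast_bound (lst : List (Option Int)) : ∀ (r : List Int),
    pvFindLast lst r = -1 ∨ pvFindLast lst r ∈ r := by
  intro r
  induction r with
  | nil => left; rfl
  | cons i rest ih =>
    simp only [pvFindLast]
    split
    · right; exact List.mem_cons_self
    · rcases ih with h | h
      · left; exact h
      · right; exact List.mem_cons_of_mem _ h

-- gap_count is unchanged by a trailing None step
theorem gc_append_none (lst : List (Option Int)) (init : Bool × Int × Bool) :
    ((lst ++ [none]).foldl pvStepA init).2.1 = (lst.foldl pvStepA init).2.1 := by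
  rw [List.foldl_append]
  simp [pvStepA]

theorem A_eq_fold (lst : List (Option Int)) :
    count_gaps_py lst = (lst.foldl pvStepA (false, 0, false)).2.1 := by
  induction lst using List.reverseRecOn with
  | nil => decide
  | append_singleton t x ih =>
    cases x with
    | some v =>
      unfold count_gaps_py
      have hlen : ((t ++ [some v]).length : Int) - 1 = (t.length : Int) := by
        simp
      rw [hlen, PySem.List.pyRange_neg_one_cons (by omega)]
      have hget : PySem.List.pyGetD (t ++ [some v]) (t.length : Int) none = some v := by
        rw [PySem.List.pyGetD_natCast]
        simp
      simp only [pvFindLast, hget]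
      rw [if_pos (Option.some_ne_none v)]
      rw [if_neg (show ¬((t.length : Int) = -1) by omega)]
      have hlen2 : (t.length : Int) + 1 = ((t ++ [some v]).length : Int) := by simp
      rw [hlen2, PySem.List.foldl_pyRange_zero_pyGetD' (t ++ [some v]) none pvStepA]
    | none =>
      unfold count_gaps_py
      have hlen : ((t ++ [none]).length : Int) - 1 = (t.length : Int) := by simp
      rw [hlen, PySem.List.pyRange_neg_one_cons (by omega)]
      have hget : PySem.List.pyGetD (t ++ [none]) (t.length : Int) none = none := by
        rw [PySem.List.pyGetD_natCast]; simp
      simp only [pvFindLast, hget]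
      rw [if_neg (show ¬(none ≠ (none : Option Int)) by simp)]
      -- the tail of the reverse scan sees only indices < t.length, where both lists agree
      have hagree : ∀ i ∈ PySem.List.pyRange ((t.length : Int) - 1) (-1) (-1),
          PySem.List.pyGetD (t ++ [none]) i none = PySem.List.pyGetD t i none := by
        intro i hi
        rw [PySem.List.mem_pyRange_neg_one] at hi
        have h0 : (0 : Int) ≤ i := by omega
        have h1 : i < ((t ++ [none]).length : Int) := by simp; omega
        have h2 : i < (t.length : Int) := by omega
        rw [PySem.List.pyGetD_eq_getElem (t ++ [none]) none h0 h1,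
          PySem.List.pyGetD_eq_getElem t none h0 h2]
        exact List.getElem_append_left (by omega)
      rw [pvFindLast_congr (t ++ [none]) t _ hagree]
      rw [gc_append_none, ← ih]
      unfold count_gaps_py
      set li := pvFindLast t (PySem.List.pyRange ((t.length : Int) - 1) (-1) (-1)) with hli
      by_cases hneg : li = -1
      · simp [hneg]
      · simp only [if_neg hneg]
        have hmem := pvFindLast_bound t (PySem.List.pyRange ((t.length : Int) - 1) (-1) (-1))
        rw [← hli] at hmem
        rcases hmem with h | h
        · exact absurd h hneg
        · rw [PySem.List.mem_pyRange_neg_one] at h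
          refine congrArg (fun s : Bool × Int × Bool => s.2.1)
            (PySem.List.foldl_congr_mem _ _ _ _ ?_)
          intro acc i hi
          rw [PySem.List.mem_pyRange_one] at hi
          have h0 : (0 : Int) ≤ i := hi.1
          have h1 : i < ((t ++ [none]).length : Int) := by simp; omega
          have h2 : i < (t.length : Int) := by omega
          rw [PySem.List.pyGetD_eq_getElem (t ++ [none]) none h0 h1,
          PySem.List.pyGetD_eq_getElem t none h0 h2]
          rw [List.getElem_append_left (by omega)]

-- ===== VERDICT (by name: the statement is the Claim_ definition above) =====
theorem count_gaps_py_spec : Claim_equal_count_gaps_py := by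
  intro lst _
  unfold Spec_count_gaps_py
  rw [A_eq_fold, B_eq_F, fold_eq_F lst false false 0, zero_add]
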